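-- pv_equiv track=rewrite | github.com/fever-ride/van-art-cine | database/scripts/run_all.py | ensure_merge_order
-- ===== SOURCE A (Python) =====
-- from typing import List
--
-- def ensure_merge_order(hy_steps: List[str]) -> List[str]:
--     """Guarantee merge-persons runs before merge-screenings if both present."""
--     if "merge-persons" in hy_steps and "merge-screenings" in hy_steps:
--         # Remove both; reinsert in the correct order at the position of the first encountered merge.
--         first_idx = min(hy_steps.index("merge-persons"),
--                         hy_steps.index("merge-screenings"))
--         others = [s for s in hy_steps if s not in {
--             "merge-persons", "merge-screenings"}]
--         # Split others around the insertion point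
--         prefix = others[:first_idx]
--         suffix = others[first_idx:]
--         return prefix + ["merge-persons", "merge-screenings"] + suffix
--     return hy_steps
-- ===== SOURCE B (Python) =====
-- from typing import List
--
-- def ensure_merge_order(hy_steps: List[str]) -> List[str]:
--     """Guarantee merge-persons runs before merge-screenings if both present."""
--     if not ("merge-persons" in hy_steps and "merge-screenings" in hy_steps):
--         return hy_steps
--     result: List[str] = []
--     inserted = False
--     for s in hy_steps:
--         if s == "merge-persons" or s == "merge-screenings":
--             if not inserted:
--                 result.append("merge-persons")
--                 result.append("merge-screenings")
--                 inserted = True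
--         else:
--             result.append(s)
--     return result
-- ===== Notes on version B (the rewrite author's own statement) =====
-- stated objective: simpler
-- what changed: Replaced min/.index/comprehension/slice-splitting with a single pass over the list that drops both merge markers and emits the ordered pair at the first marker's position, tracked by a boolean flag.
import Mathlib
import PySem

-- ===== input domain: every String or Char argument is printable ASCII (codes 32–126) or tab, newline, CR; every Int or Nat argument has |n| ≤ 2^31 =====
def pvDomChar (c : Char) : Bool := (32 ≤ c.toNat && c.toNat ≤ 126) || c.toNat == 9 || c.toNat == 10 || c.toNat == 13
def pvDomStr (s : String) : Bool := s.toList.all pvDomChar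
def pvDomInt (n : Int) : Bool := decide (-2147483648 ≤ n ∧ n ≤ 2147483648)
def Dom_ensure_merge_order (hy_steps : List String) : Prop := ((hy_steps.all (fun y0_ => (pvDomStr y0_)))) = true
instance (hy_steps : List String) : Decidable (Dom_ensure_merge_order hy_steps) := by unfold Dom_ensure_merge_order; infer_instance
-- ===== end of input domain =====

-- B replaces A's min/.index/filter/slice pipeline with one single-pass loop and a flag (objective: simpler).


-- ===== PORT A =====
-- `hy_steps.index(x)` is exact as List.idxOf here: inside the branch both strings are members.
-- `others[:i]`/`others[i:]` with the nonnegative i are exactly take/drop.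
def ensure_merge_order (hy_steps : List String) : List String :=
  if "merge-persons" ∈ hy_steps ∧ "merge-screenings" ∈ hy_steps then
    let first_idx := min (hy_steps.idxOf "merge-persons") (hy_steps.idxOf "merge-screenings")
    let others := hy_steps.filter (fun s => !(s == "merge-persons" || s == "merge-screenings"))
    let prefix_ := others.take first_idx
    let suffix := others.drop first_idx
    prefix_ ++ ["merge-persons", "merge-screenings"] ++ suffix
  else hy_steps

-- ===== PORT B =====
-- single pass with the `inserted` flag
def emoGo (l : List String) (inserted : Bool) : List String :=
  match l with
  | [] => []
  | s :: rest =>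
    if s = "merge-persons" ∨ s = "merge-screenings" then
      if inserted then emoGo rest true
      else "merge-persons" :: "merge-screenings" :: emoGo rest true
    else s :: emoGo rest inserted

def ensure_merge_order_alt (hy_steps : List String) : List String :=
  if "merge-persons" ∈ hy_steps ∧ "merge-screenings" ∈ hy_steps then
    emoGo hy_steps false
  else hy_steps

-- ===== PRECONDITION & SPEC =====
def Spec_ensure_merge_order (hy_steps : List String) (out : List String) : Prop := out = ensure_merge_order_alt hy_steps
instance (hy_steps : List String) (out : List String) : Decidable (Spec_ensure_merge_order hy_steps out) := by unfold Spec_ensure_merge_order; infer_instance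

-- ===== CLAIM (what is proved, stated in full; the proofs are below) =====
def Claim_equal_ensure_merge_order : Prop := ∀ (hy_steps : List String), Dom_ensure_merge_order hy_steps → Spec_ensure_merge_order hy_steps (ensure_merge_order hy_steps)

-- ===== LEMMAS AND PROOFS =====

-- once the pair is inserted, the loop just filters out the markers
theorem emoGo_true (l : List String) :
    emoGo l true = l.filter (fun s => !(s == "merge-persons" || s == "merge-screenings")) := by
  induction l with
  | nil => rfl
  | cons s rest ih =>
    by_cases h : s = "merge-persons" ∨ s = "merge-screenings"
    · simp [emoGo, h, List.filter]
      rcases h with h | h <;> simp [h, ih]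
    · push_neg at h
      rw [emoGo, if_neg (by tauto), List.filter_cons_of_pos (by simp [h.1, h.2]), ih]

-- the main invariant, by induction on the list
theorem emoGo_main (l : List String)
    (hp : "merge-persons" ∈ l) (hs : "merge-screenings" ∈ l) :
    (l.filter (fun s => !(s == "merge-persons" || s == "merge-screenings"))).take
        (min (l.idxOf "merge-persons") (l.idxOf "merge-screenings"))
      ++ ["merge-persons", "merge-screenings"]
      ++ (l.filter (fun s => !(s == "merge-persons" || s == "merge-screenings"))).drop
        (min (l.idxOf "merge-persons") (l.idxOf "merge-screenings"))
      = emoGo l false := by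
  induction l with
  | nil => cases hp
  | cons x rest ih =>
    by_cases h : x = "merge-persons" ∨ x = "merge-screenings"
    · have hidx : min ((x :: rest).idxOf "merge-persons") ((x :: rest).idxOf "merge-screenings") = 0 := by
        rcases h with h | h <;> simp [h, List.idxOf_cons]
      rw [hidx]
      have hf : (x :: rest).filter (fun s => !(s == "merge-persons" || s == "merge-screenings"))
          = rest.filter (fun s => !(s == "merge-persons" || s == "merge-screenings")) := by
        rcases h with h | h <;> simp [h, List.filter]
      rw [hf]
      simp [emoGo, h, emoGo_true]
    · push_neg at h
      obtain ⟨h1, h2⟩ := h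
      have hp' : "merge-persons" ∈ rest := by
        cases hp with
        | head => exact absurd rfl h1
        | tail _ hm => exact hm
      have hs' : "merge-screenings" ∈ rest := by
        cases hs with
        | head => exact absurd rfl h2
        | tail _ hm => exact hm
      have hi1 : (x :: rest).idxOf "merge-persons" = rest.idxOf "merge-persons" + 1 := by
        simp [List.idxOf_cons, beq_iff_eq, h1]
      have hi2 : (x :: rest).idxOf "merge-screenings" = rest.idxOf "merge-screenings" + 1 := by
        simp [List.idxOf_cons, beq_iff_eq, h2]
      have hmin : min ((x :: rest).idxOf "merge-persons") ((x :: rest).idxOf "merge-screenings")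
          = min (rest.idxOf "merge-persons") (rest.idxOf "merge-screenings") + 1 := by
        rw [hi1, hi2]; omega
      have hf : (x :: rest).filter (fun s => !(s == "merge-persons" || s == "merge-screenings"))
          = x :: rest.filter (fun s => !(s == "merge-persons" || s == "merge-screenings")) := by
        rw [List.filter_cons_of_pos]
        simp [h1, h2]
      rw [hmin, hf]
      simp only [List.take_succ_cons, List.drop_succ_cons, List.cons_append]
      rw [ih hp' hs']
      simp [emoGo, h1, h2]

-- ===== VERDICT (by name: the statement is the Claim_ definition above) =====
theorem ensure_merge_order_spec : Claim_equal_ensure_merge_order := by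
  intro hy_steps _
  unfold Spec_ensure_merge_order ensure_merge_order ensure_merge_order_alt
  by_cases h : "merge-persons" ∈ hy_steps ∧ "merge-screenings" ∈ hy_steps
  · rw [if_pos h, if_pos h]
    exact emoGo_main hy_steps h.1 h.2
  · rw [if_neg h, if_neg h]
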